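-- pv_equiv track=rewrite | github.com/middledoor0421/bird_sahi_temporal | sahi_temporal/v6/tiles_explore.py | _build_row_ids
-- ===== SOURCE A (Python) =====
-- from typing import Dict, List, Optional
--
-- def _build_row_ids(tiles: List[Dict[str, int]]):
--     ys = sorted({int(t["y"]) for t in tiles})
--     y_to_row = {y: i for i, y in enumerate(ys)}
--
--     tile_to_row: Dict[int, int] = {}
--     rows: List[List[int]] = [[] for _ in range(len(ys))]
--
--     for tid, t in enumerate(tiles):
--         r = y_to_row[int(t["y"])]
--         tile_to_row[int(tid)] = int(r)
--         rows[int(r)].append(int(tid))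
--
--     # Row-major order (left->right)
--     for r in range(len(rows)):
--         rows[r] = sorted(rows[r], key=lambda tid: int(tiles[int(tid)]["x"]))
--
--     return tile_to_row, rows
-- ===== SOURCE B (Python) =====
-- def _build_row_ids(tiles):
--     n = len(tiles)
--     order = sorted(range(n), key=lambda tid: (int(tiles[tid]["y"]), int(tiles[tid]["x"])))
--     rows = []
--     row_of = [0] * n
--     prev_y = 0
--     for tid in order:
--         y = int(tiles[tid]["y"])
--         if not rows or y != prev_y:
--             rows.append([])
--         rows[-1].append(tid)
--         row_of[tid] = len(rows) - 1
--         prev_y = y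
--     tile_to_row = {tid: row_of[tid] for tid in range(n)}
--     return tile_to_row, rows
-- ===== Notes on version B (the rewrite author's own statement) =====
-- stated objective: alternative
-- what changed: Replaces A's build-y-index/bucket-into-rows/sort-each-row-by-x pipeline with one stable global sort of tile indices by the composite key (y, x) followed by a single linear pass that starts a new row whenever y changes; the row index array is filled during that pass and the tid->row dict is emitted afterwards in ascending tid order.
import Mathlib
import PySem

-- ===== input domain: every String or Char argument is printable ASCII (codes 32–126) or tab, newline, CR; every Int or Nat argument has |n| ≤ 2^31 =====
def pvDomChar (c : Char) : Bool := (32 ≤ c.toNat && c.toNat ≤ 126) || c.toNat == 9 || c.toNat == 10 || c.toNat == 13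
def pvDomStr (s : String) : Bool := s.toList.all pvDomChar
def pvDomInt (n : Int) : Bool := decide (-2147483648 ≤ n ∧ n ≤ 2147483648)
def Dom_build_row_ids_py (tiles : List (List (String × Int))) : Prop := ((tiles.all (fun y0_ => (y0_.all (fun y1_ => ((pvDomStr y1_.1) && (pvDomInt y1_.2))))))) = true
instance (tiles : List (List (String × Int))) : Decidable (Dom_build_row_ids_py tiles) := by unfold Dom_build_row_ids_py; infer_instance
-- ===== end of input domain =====

-- B replaces A's bucket-by-y/sort-each-row pipeline by one stable global sort by (y, x)
-- followed by a single linear grouping pass; same results, similar cost (objective: alternative).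

-- ===== PORT A =====

/-- `t[k]`: first-match lookup in the tile dict; under `Pre_` the key is present,
so the `0` default is never used on admitted inputs. -/
def pvLook (t : List (String × Int)) (k : String) : Int :=
  ((PySem.Dict.mk t).get? k).getD 0

def build_row_ids_py (tiles : List (List (String × Int))) : (List (Int × Int)) × List (List Int) :=
  -- ys = sorted({int(t["y"]) for t in tiles})
  let ys : List Int :=
    PySem.List.sorted (PySem.Set.ofList (tiles.map (fun t => pvLook t "y"))) (fun y => y) false
  -- y_to_row = {y: i for i, y in enumerate(ys)}
  let y_to_row : PySem.Dict Int Int :=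
    ys.zipIdx.foldl (fun d p => d.insert p.1 (p.2 : Int)) (PySem.Dict.mk [])
  -- for tid, t in enumerate(tiles): r = y_to_row[int(t["y"])]; tile_to_row[tid] = r; rows[r].append(tid)
  -- (r is an index produced by enumerate(ys), so 0 ≤ r < len(rows) and `.toNat` is exact here)
  let st :=
    tiles.zipIdx.foldl (fun (st : PySem.Dict Int Int × List (List Int)) p =>
      let r : Int := (y_to_row.get? (pvLook p.1 "y")).getD 0
      (st.1.insert (p.2 : Int) r,
       st.2.set r.toNat ((st.2.getD r.toNat []) ++ [(p.2 : Int)])))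
      (PySem.Dict.mk [], List.replicate ys.length ([] : List Int))
  -- for r in range(len(rows)): rows[r] = sorted(rows[r], key=lambda tid: int(tiles[int(tid)]["x"]))
  let rows := (List.range st.2.length).foldl
      (fun rows r => rows.set r (PySem.List.sorted (rows.getD r [])
        (fun tid => pvLook (PySem.List.pyGetD tiles tid []) "x") false)) st.2
  (st.1.items, rows)

-- ===== PORT B =====

/-- `int(tiles[tid]["y"])`; `tid` is always a valid index where B uses it. -/
def pvTileY (tiles : List (List (String × Int))) (tid : Int) : Int :=
  pvLook (PySem.List.pyGetD tiles tid []) "y"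

/-- `int(tiles[tid]["x"])`; `tid` is always a valid index where B uses it. -/
def pvTileX (tiles : List (List (String × Int))) (tid : Int) : Int :=
  pvLook (PySem.List.pyGetD tiles tid []) "x"

/-- The body of B's grouping loop (one iteration of `for tid in order`). -/
def pvBStep (tiles : List (List (String × Int)))
    (st : List (List Int) × List Int × Int) (tid : Int) : List (List Int) × List Int × Int :=
  let y := pvTileY tiles tid
  let rows := if st.1.isEmpty || !(y == st.2.2) then st.1 ++ [[]] else st.1
  let rows2 := rows.set (rows.length - 1) ((rows.getD (rows.length - 1) []) ++ [tid])
  (rows2, st.2.1.set tid.toNat ((rows2.length : Int) - 1), y)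

def build_row_ids_py_alt (tiles : List (List (String × Int))) : (List (Int × Int)) × List (List Int) :=
  let n : Int := (tiles.length : Int)
  -- order = sorted(range(n), key=lambda tid: (int(tiles[tid]["y"]), int(tiles[tid]["x"])))
  let order := PySem.List.sorted2 (PySem.List.pyRange 0 n 1) (pvTileY tiles) (pvTileX tiles) false
  -- the grouping pass; state = (rows, row_of, prev_y); rows[-1] is rows[len(rows)-1] (rows nonempty there)
  let st := order.foldl (pvBStep tiles) ([], List.replicate tiles.length (0 : Int), 0)
  -- tile_to_row = {tid: row_of[tid] for tid in range(n)}
  let tile_to_row := (PySem.List.pyRange 0 n 1).foldl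
      (fun d tid => d.insert tid (PySem.List.pyGetD st.2.1 tid 0)) (PySem.Dict.mk [])
  (tile_to_row.items, st.1)

-- ===== PRECONDITION & SPEC =====

/-- A raises `KeyError` when some tile lacks the key `"y"` or `"x"`; exactly those
inputs are excluded. -/
def Pre_build_row_ids_py (tiles : List (List (String × Int))) : Prop :=
  (tiles.all (fun t => (PySem.Dict.mk t).contains "y" && (PySem.Dict.mk t).contains "x")) = true

instance (tiles : List (List (String × Int))) : Decidable (Pre_build_row_ids_py tiles) := by
  unfold Pre_build_row_ids_py; infer_instance

def pvWitness_build_row_ids_py : (List (List (String × Int))) :=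
  [[("y", 4), ("x", 7)], [("y", 1), ("x", 2)], [("y", 4), ("x", 3)]]

def Spec_build_row_ids_py (tiles : List (List (String × Int))) (out : (List (Int × Int)) × List (List Int)) : Prop := out = build_row_ids_py_alt tiles
instance (tiles : List (List (String × Int))) (out : (List (Int × Int)) × List (List Int)) : Decidable (Spec_build_row_ids_py tiles out) := by unfold Spec_build_row_ids_py; infer_instance

-- ===== CLAIM (what is proved, stated in full; the proofs are below) =====
def Claim_equal_build_row_ids_py : Prop := ∀ (tiles : List (List (String × Int))), Dom_build_row_ids_py tiles → Pre_build_row_ids_py tiles → Spec_build_row_ids_py tiles (build_row_ids_py tiles)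

-- ===== LEMMAS AND PROOFS =====

-- Proof-side vocabulary ------------------------------------------------------

def pvIds (tiles : List (List (String × Int))) : List Int :=
  (List.range tiles.length).map (fun i : Nat => (i : Int))

def pvYs (tiles : List (List (String × Int))) : List Int :=
  PySem.List.sorted (PySem.Set.ofList ((pvIds tiles).map (pvTileY tiles))) (fun y => y) false

def pvBucket (tiles : List (List (String × Int))) (v : Int) : List Int :=
  (pvIds tiles).filter (fun tid => pvTileY tiles tid == v)

def pvBl (tiles : List (List (String × Int))) (v : Int) : List Int :=
  PySem.List.sorted (pvBucket tiles v) (pvTileX tiles) false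

def pvRows (tiles : List (List (String × Int))) : List (List Int) :=
  (pvYs tiles).map (pvBl tiles)

def pvRank (tiles : List (List (String × Int))) (v : Int) : Int :=
  (((pvYs tiles).idxOf v : Nat) : Int)

def pvPairs (tiles : List (List (String × Int))) : List (Int × Int) :=
  (pvIds tiles).map (fun tid => (tid, pvRank tiles (pvTileY tiles tid)))

def pvLexB {α : Type} (k1 k2 : α → Int) (p q : α) : Bool :=
  decide (k1 p < k1 q) || !decide (k1 q < k1 p) && decide (k2 p < k2 q)

-- generic list facts ---------------------------------------------------------

theorem pv_map_getD_range {β γ : Type} (f : β → γ) (d : β) :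
    ∀ l : List β, (List.range l.length).map (fun i => f (l.getD i d)) = l.map f := by
  intro l
  induction l with
  | nil => simp
  | cons a l ih =>
    simp only [List.length_cons, List.range_succ_eq_map, List.map_cons, List.map_map,
      List.getD_cons_zero, List.map_cons]
    refine congrArg (f a :: ·) ?_
    rw [← ih]
    apply List.map_congr_left
    intro i _
    simp [Function.comp]

theorem pv_zipIdx_eq_map {β : Type} (d : β) :
    ∀ (l : List β) (k : Nat),
      l.zipIdx k = (List.range l.length).map (fun i => (l.getD i d, k + i)) := by
  intro l
  induction l with
  | nil => intro k; simp
  | cons a l ih =>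
    intro k
    simp only [List.zipIdx_cons, List.length_cons, List.range_succ_eq_map, List.map_cons,
      List.map_map, List.getD_cons_zero, Nat.add_zero]
    refine congrArg ((a, k) :: ·) ?_
    rw [ih (k + 1)]
    apply List.map_congr_left
    intro i _
    simp only [Function.comp, List.getD_cons_succ]
    have : k + 1 + i = k + (i + 1) := by omega
    rw [this]

theorem pv_getD_set_self {α : Type} (l : List α) (n : Nat) (a d : α) (h : n < l.length) :
    (l.set n a).getD n d = a := by
  simp [List.getD_eq_getElem?_getD, h]

theorem pv_getD_set_ne {α : Type} (l : List α) (n m : Nat) (a d : α) (h : n ≠ m) :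
    (l.set n a).getD m d = l.getD m d := by
  simp [List.getD_eq_getElem?_getD, h]

theorem pv_foldl_set_map {α : Type} (g : α → α) (d : α) (l : List α) :
    (List.range l.length).foldl (fun acc r => acc.set r (g (acc.getD r d))) l = l.map g := by
  have aux : ∀ m, m ≤ l.length →
      (List.range m).foldl (fun acc r => acc.set r (g (acc.getD r d))) l
        = (l.take m).map g ++ l.drop m := by
    intro m
    induction m with
    | zero => simp
    | succ m ih =>
      intro hm
      have hml : m < l.length := by omega
      rw [List.range_succ, List.foldl_append, ih (by omega)]
      simp only [List.foldl_cons, List.foldl_nil]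
      have hlen : ((l.take m).map g).length = m := by
        simp [List.length_take]; omega
      have hdrop : l.drop m = l[m] :: l.drop (m + 1) := List.drop_eq_getElem_cons hml
      have hget : ((l.take m).map g ++ l.drop m).getD m d = l[m] := by
        rw [List.getD_append_right _ _ _ _ (by omega), hlen, Nat.sub_self, hdrop]
        rfl
      rw [hget, List.set_append_right _ _ (by omega), hlen, Nat.sub_self, hdrop]
      simp only [List.set_cons_zero]
      rw [List.take_add_one, List.getElem?_eq_getElem hml]
      simp only [Option.toList_some, List.map_append, List.map_cons, List.map_nil,
        List.append_assoc, List.cons_append, List.nil_append]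
  have := aux l.length (le_refl _)
  simpa using this

theorem pv_map_set_at (f : Int → List Int) (e : Int) :
    ∀ (vs : List Int) (u : Int), vs.Nodup → u ∈ vs →
      (vs.map f).set (vs.idxOf u) (f u ++ [e])
        = vs.map (fun v => f v ++ if v = u then [e] else []) := by
  intro vs
  induction vs with
  | nil => intro u _ h; cases h
  | cons v vs ih =>
    intro u hnd hm
    rcases List.nodup_cons.mp hnd with ⟨hv, hnd'⟩
    by_cases hu : v = u
    · subst hu
      rw [List.idxOf_cons_self]
      simp only [List.map_cons, List.set_cons_zero]
      refine congrArg _ ?_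
      apply List.map_congr_left
      intro w hw
      have : ¬ w = v := fun h => hv (h ▸ hw)
      simp [this]
    · have hm' : u ∈ vs := by
        rcases List.mem_cons.mp hm with h | h
        · exact absurd h.symm hu
        · exact h
      rw [List.idxOf_cons_ne _ hu, Nat.succ_eq_add_one]
      simp only [List.map_cons, List.set_cons_succ]
      rw [ih u hnd' hm']
      simp [hu]

theorem pv_map_getD_idxOf (f : Int → List Int) (d : List Int) :
    ∀ (vs : List Int) (u : Int), u ∈ vs → (vs.map f).getD (vs.idxOf u) d = f u := by
  intro vs
  induction vs with
  | nil => intro u h; cases h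
  | cons v vs ih =>
    intro u hm
    by_cases hu : v = u
    · subst hu
      rw [List.idxOf_cons_self]
      rfl
    · have hm' : u ∈ vs := by
        rcases List.mem_cons.mp hm with h | h
        · exact absurd h.symm hu
        · exact h
      rw [List.idxOf_cons_ne _ hu, Nat.succ_eq_add_one]
      simpa [List.getD_cons_succ] using ih u hm'

-- insertBy -------------------------------------------------------------------

theorem pv_insertBy_nil {α : Type} (before : α → α → Bool) (a : α) :
    PySem.List.insertBy before a [] = [a] := rfl

theorem pv_insertBy_cons {α : Type} (before : α → α → Bool) (a y : α) (ys : List α) :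
    PySem.List.insertBy before a (y :: ys)
      = if before a y then a :: y :: ys else y :: PySem.List.insertBy before a ys := rfl

theorem pv_insertBy_skip {α : Type} (before : α → α → Bool) (a : α) :
    ∀ (l1 l2 : List α), (∀ y ∈ l1, before a y = false) →
      PySem.List.insertBy before a (l1 ++ l2) = l1 ++ PySem.List.insertBy before a l2 := by
  intro l1
  induction l1 with
  | nil => intro l2 _; rfl
  | cons y l1 ih =>
    intro l2 h
    rw [List.cons_append, pv_insertBy_cons, if_neg (by simp [h y (List.mem_cons_self ..)]),
      ih l2 (fun z hz => h z (List.mem_cons_of_mem _ hz))]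
    rfl

theorem pv_insertBy_front {α : Type} (before : α → α → Bool) (a : α) (l : List α)
    (h : ∀ y ∈ l, before a y = true) : PySem.List.insertBy before a l = a :: l := by
  cases l with
  | nil => rfl
  | cons y ys => rw [pv_insertBy_cons, if_pos (h y (List.mem_cons_self ..))]

theorem pv_insertBy_block {α : Type} (before before' : α → α → Bool) (a : α) :
    ∀ (l rest : List α), (∀ y ∈ l, before a y = before' a y) →
      (∀ y ∈ rest, before a y = true) →
      PySem.List.insertBy before a (l ++ rest) = PySem.List.insertBy before' a l ++ rest := by
  intro l
  induction l with
  | nil =>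
    intro rest _ h2
    rw [List.nil_append, pv_insertBy_nil, pv_insertBy_front _ _ _ h2]
    rfl
  | cons y l ih =>
    intro rest h1 h2
    have hy := h1 y (List.mem_cons_self ..)
    rw [List.cons_append, pv_insertBy_cons, pv_insertBy_cons, hy]
    by_cases hb : before' a y = true
    · rw [if_pos hb, if_pos hb]; rfl
    · rw [if_neg hb, if_neg hb, ih rest (fun z hz => h1 z (List.mem_cons_of_mem _ hz)) h2]
      rfl

theorem pv_sorted2_eq_foldl {α : Type} (xs : List α) (k1 k2 : α → Int) :
    PySem.List.sorted2 xs k1 k2 false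
      = xs.foldl (fun acc x => PySem.List.insertBy (pvLexB k1 k2) x acc) [] := rfl

theorem pv_sorted_append_singleton {α : Type} (xs : List α) (a : α) (key : α → Int) :
    PySem.List.sorted (xs ++ [a]) key false
      = PySem.List.insertBy (fun p q => decide (key p < key q)) a (PySem.List.sorted xs key false) := by
  rw [PySem.List.sorted_eq_foldl_insertBy, PySem.List.sorted_eq_foldl_insertBy,
    List.foldl_append]
  rfl

theorem pv_sorted2_append_singleton {α : Type} (xs : List α) (a : α) (k1 k2 : α → Int) :
    PySem.List.sorted2 (xs ++ [a]) k1 k2 false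
      = PySem.List.insertBy (pvLexB k1 k2) a (PySem.List.sorted2 xs k1 k2 false) := by
  rw [pv_sorted2_eq_foldl, pv_sorted2_eq_foldl, List.foldl_append]
  rfl

theorem pv_flatMap_congr {α β : Type} (V : List α) (f g : α → List β)
    (h : ∀ v ∈ V, f v = g v) : V.flatMap f = V.flatMap g := by
  induction V with
  | nil => rfl
  | cons v V ih =>
    simp only [List.flatMap_cons]
    rw [h v (List.mem_cons_self ..), ih (fun w hw => h w (List.mem_cons_of_mem _ hw))]

theorem pv_lexB_lt_false {α : Type} (k1 k2 : α → Int) (a y : α) (h : k1 y < k1 a) :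
    pvLexB k1 k2 a y = false := by
  simp [pvLexB, h, asymm h]

theorem pv_lexB_gt_true {α : Type} (k1 k2 : α → Int) (a y : α) (h : k1 a < k1 y) :
    pvLexB k1 k2 a y = true := by
  simp [pvLexB, h]

theorem pv_lexB_eq {α : Type} (k1 k2 : α → Int) (a y : α) (h : k1 y = k1 a) :
    pvLexB k1 k2 a y = decide (k2 a < k2 y) := by
  simp [pvLexB, h]

theorem pv_sorted_id_append_singleton (xs : List Int) (a : Int) :
    PySem.List.sorted (xs ++ [a]) (fun y => y) false
      = PySem.List.insertBy (fun p q => decide (p < q)) a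
          (PySem.List.sorted xs (fun y => y) false) := by
  rw [PySem.List.sorted_eq_foldl_insertBy, PySem.List.sorted_eq_foldl_insertBy,
    List.foldl_append]
  rfl

theorem pv_insert_flat_mem {α : Type} (k1 k2 : α → Int) (Bf : Int → List α) (a : α) :
    ∀ (V : List Int), V.Pairwise (· < ·) → (∀ v ∈ V, ∀ y ∈ Bf v, k1 y = v) → k1 a ∈ V →
      PySem.List.insertBy (pvLexB k1 k2) a (V.flatMap Bf)
        = V.flatMap (fun v => if v = k1 a
            then PySem.List.insertBy (fun p q => decide (k2 p < k2 q)) a (Bf v) else Bf v) := by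
  intro V
  induction V with
  | nil => intro _ _ h; cases h
  | cons v V ih =>
    intro hpw hY hmem
    have hv : ∀ w ∈ V, v < w := (List.pairwise_cons.mp hpw).1
    have hpw' : V.Pairwise (· < ·) := (List.pairwise_cons.mp hpw).2
    have hYv : ∀ y ∈ Bf v, k1 y = v := hY v (List.mem_cons_self ..)
    have hYt : ∀ w ∈ V, ∀ y ∈ Bf w, k1 y = w := fun w hw => hY w (List.mem_cons_of_mem _ hw)
    rcases lt_trichotomy v (k1 a) with hlt | heq | hgt
    · have hmem' : k1 a ∈ V := by
        rcases List.mem_cons.mp hmem with h | h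
        · omega
        · exact h
      simp only [List.flatMap_cons]
      rw [pv_insertBy_skip _ _ _ _ (fun y hy => pv_lexB_lt_false k1 k2 a y (by rw [hYv y hy]; exact hlt)),
        ih hpw' hYt hmem']
      have hne : ¬ v = k1 a := by omega
      simp [hne]
    · simp only [List.flatMap_cons]
      rw [pv_insertBy_block (pvLexB k1 k2) (fun p q => decide (k2 p < k2 q)) a _ _
        (fun y hy => pv_lexB_eq k1 k2 a y (by rw [hYv y hy]; exact heq))
        (fun y hy => by
          rcases List.mem_flatMap.mp hy with ⟨w, hw, hyw⟩
          exact pv_lexB_gt_true k1 k2 a y (by rw [hYt w hw y hyw]; have := hv w hw; omega))]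
      rw [if_pos heq]
      refine congrArg _ ?_
      apply pv_flatMap_congr
      intro w hw
      have : ¬ w = k1 a := by have := hv w hw; omega
      rw [if_neg this]
    · exfalso
      rcases List.mem_cons.mp hmem with h | h
      · omega
      · have := hv _ h; omega

theorem pv_insert_flat_new {α : Type} (k1 k2 : α → Int) (Bf : Int → List α) (a : α) :
    ∀ (V : List Int), V.Pairwise (· < ·) → (∀ v ∈ V, ∀ y ∈ Bf v, k1 y = v) → k1 a ∉ V →
      PySem.List.insertBy (pvLexB k1 k2) a (V.flatMap Bf)
        = (PySem.List.insertBy (fun p q => decide (p < q)) (k1 a) V).flatMap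
            (fun v => if v = k1 a then [a] else Bf v) := by
  intro V
  induction V with
  | nil =>
    intro _ _ _
    simp [pv_insertBy_nil]
  | cons v V ih =>
    intro hpw hY hnm
    have hv : ∀ w ∈ V, v < w := (List.pairwise_cons.mp hpw).1
    have hpw' : V.Pairwise (· < ·) := (List.pairwise_cons.mp hpw).2
    have hYv : ∀ y ∈ Bf v, k1 y = v := hY v (List.mem_cons_self ..)
    have hYt : ∀ w ∈ V, ∀ y ∈ Bf w, k1 y = w := fun w hw => hY w (List.mem_cons_of_mem _ hw)
    have hvne : ¬ v = k1 a := fun h => hnm (h ▸ List.mem_cons_self ..)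
    have hnm' : k1 a ∉ V := fun h => hnm (List.mem_cons_of_mem _ h)
    rcases lt_trichotomy v (k1 a) with hlt | heq | hgt
    · simp only [List.flatMap_cons]
      rw [pv_insertBy_skip _ _ _ _ (fun y hy => pv_lexB_lt_false k1 k2 a y (by rw [hYv y hy]; exact hlt)),
        ih hpw' hYt hnm', pv_insertBy_cons, if_neg (by simp; omega)]
      simp only [List.flatMap_cons, if_neg hvne]
    · exact absurd heq hvne
    · rw [pv_insertBy_front _ _ _ (fun y hy => by
        rcases List.mem_flatMap.mp hy with ⟨w, hw, hyw⟩
        rcases List.mem_cons.mp hw with hwv | hwV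
        · subst hwv
          exact pv_lexB_gt_true k1 k2 a y (by rw [hYv y hyw]; exact hgt)
        · exact pv_lexB_gt_true k1 k2 a y (by rw [hYt w hwV y hyw]; have := hv w hwV; omega))]
      rw [pv_insertBy_cons, if_pos (by simp [hgt])]
      conv_rhs => rw [List.flatMap_cons]
      rw [if_pos rfl, List.singleton_append]
      refine congrArg (a :: ·) ?_
      apply pv_flatMap_congr
      intro w hw
      rcases List.mem_cons.mp hw with hwv | hwV
      · subst hwv; rw [if_neg hvne]
      · rw [if_neg (by have := hv w hwV; omega)]

theorem pv_sorted2_flatten {α : Type} (k1 k2 : α → Int) :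
    ∀ (xs : List α),
      PySem.List.sorted2 xs k1 k2 false
        = (PySem.List.sorted (PySem.Set.ofList (xs.map k1)) (fun y => y) false).flatMap
            (fun v => PySem.List.sorted (xs.filter (fun x => k1 x == v)) k2 false) := by
  intro xs
  induction xs using List.reverseRecOn with
  | nil => rfl
  | append_singleton l a ih =>
    have hYB : ∀ v ∈ PySem.List.sorted (PySem.Set.ofList (l.map k1)) (fun y => y) false,
        ∀ y ∈ PySem.List.sorted (l.filter (fun x => k1 x == v)) k2 false, k1 y = v := by
      intro v _ y hy
      have := List.of_mem_filter ((PySem.List.mem_sorted _ _ _ _).mp hy)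
      exact eq_of_beq this
    have hpw : (PySem.List.sorted (PySem.Set.ofList (l.map k1)) (fun y => y) false).Pairwise (· < ·) :=
      PySem.List.sorted_ofList_pairwise_lt _
    rw [pv_sorted2_append_singleton, ih, List.map_append, List.map_cons, List.map_nil,
      PySem.Set.ofList_append_singleton]
    by_cases hmem : k1 a ∈ l.map k1
    · rw [PySem.Set.add_of_mem ((PySem.Set.mem_ofList _ _).mpr hmem)]
      have hVmem : k1 a ∈ PySem.List.sorted (PySem.Set.ofList (l.map k1)) (fun y => y) false :=
        (PySem.List.mem_sorted _ _ _ _).mpr ((PySem.Set.mem_ofList _ _).mpr hmem)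
      rw [pv_insert_flat_mem k1 k2 _ a _ hpw hYB hVmem]
      apply pv_flatMap_congr
      intro v hv
      rw [List.filter_append]
      by_cases hva : v = k1 a
      · subst hva
        rw [if_pos rfl, List.filter_cons, List.filter_nil, if_pos (by simp),
          pv_sorted_append_singleton]
      · have hbeq : (k1 a == v) = false := beq_eq_false_iff_ne.mpr (fun h => hva h.symm)
        rw [if_neg hva, List.filter_cons, List.filter_nil, if_neg (by simp [hbeq]),
          List.append_nil]
    · have hnm : k1 a ∉ PySem.List.sorted (PySem.Set.ofList (l.map k1)) (fun y => y) false :=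
        fun h => hmem ((PySem.Set.mem_ofList _ _).mp ((PySem.List.mem_sorted _ _ _ _).mp h))
      rw [PySem.Set.add_of_not_mem (fun h => hmem ((PySem.Set.mem_ofList _ _).mp h))]
      rw [pv_sorted_id_append_singleton, pv_insert_flat_new k1 k2 _ a _ hpw hYB hnm]
      apply pv_flatMap_congr
      intro v hv
      rcases (PySem.List.mem_insertBy _ _ _ _).mp hv with hva | hvV
      · subst hva
        have hfl : l.filter (fun x => k1 x == k1 a) = [] := by
          apply List.filter_eq_nil_iff.mpr
          intro x hx
          simp only [beq_iff_eq]
          exact fun h => hmem (h ▸ List.mem_map_of_mem hx)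
        rw [if_pos rfl, List.filter_append, hfl, List.nil_append, List.filter_cons,
          List.filter_nil, if_pos (by simp)]
        rfl
      · have hne : ¬ v = k1 a := fun h => hnm (h ▸ hvV)
        rw [if_neg hne, List.filter_append]
        have : (k1 a == v) = false := beq_eq_false_iff_ne.mpr (fun h => hne h.symm)
        simp [this]

-- dict folds -----------------------------------------------------------------

theorem pv_map_fst_zipIdx {β : Type} :
    ∀ (l : List β) (k : Nat), (l.zipIdx k).map (fun p => p.1) = l := by
  intro l
  induction l with
  | nil => intro k; rfl
  | cons a l ih => intro k; simp only [List.zipIdx_cons, List.map_cons, ih]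

theorem pv_tileY_nat (tiles : List (List (String × Int))) (i : Nat) :
    pvTileY tiles (i : Int) = pvLook (tiles.getD i []) "y" := by
  simp [pvTileY, PySem.List.pyGetD_natCast]

theorem pv_foldl_insert_items {β : Type} (keyf valf : β → Int) :
    ∀ (l : List β) (d : PySem.Dict Int Int), (l.map keyf).Nodup →
      (∀ b ∈ l, d.contains (keyf b) = false) →
      (l.foldl (fun d b => d.insert (keyf b) (valf b)) d).items
        = d.items ++ l.map (fun b => (keyf b, valf b)) := by
  intro l
  induction l with
  | nil => intro d _ _; simp
  | cons b l ih =>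
    intro d hnd hfree
    have hb : d.contains (keyf b) = false := hfree b (List.mem_cons_self ..)
    have hins : (d.insert (keyf b) (valf b)).items = d.items ++ [(keyf b, valf b)] := by
      simp [PySem.Dict.insert, hb]
    have hbk : ∀ x ∈ l, ¬ keyf x = keyf b := by
      have := (List.nodup_cons.mp (by simpa using hnd : (keyf b :: l.map keyf).Nodup)).1
      intro x hx hxe
      exact this (hxe ▸ List.mem_map_of_mem hx)
    have hnd' : (l.map keyf).Nodup := (List.nodup_cons.mp (by simpa using hnd : (keyf b :: l.map keyf).Nodup)).2
    simp only [List.foldl_cons]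
    rw [ih _ hnd' ?_]
    · rw [hins, List.map_cons]
      simp [List.append_assoc]
    · intro b' hb'
      have hne : (keyf b == keyf b') = false :=
        beq_eq_false_iff_ne.mpr (fun h => hbk b' hb' h.symm)
      have h1 := hfree b' (List.mem_cons_of_mem _ hb')
      simp only [PySem.Dict.contains] at h1 ⊢
      rw [hins]
      simp [List.any_append, h1, hne]

theorem pv_find_zipIdx :
    ∀ (ys : List Int) (v : Int) (k : Nat), ys.Nodup → v ∈ ys →
      List.find? (fun p => p.1 == v) (List.map (fun p => (p.1, (p.2 : Int))) (ys.zipIdx k))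
        = some (v, ((k + ys.idxOf v : Nat) : Int)) := by
  intro ys
  induction ys with
  | nil => intro v k _ h; cases h
  | cons y ys ih =>
    intro v k hnd hm
    rw [List.zipIdx_cons, List.map_cons]
    by_cases hv : y = v
    · subst hv
      rw [List.find?_cons_of_pos (by simp), List.idxOf_cons_self]
      simp
    · have hbeq : (y == v) = false := beq_eq_false_iff_ne.mpr hv
      rw [List.find?_cons_of_neg (by simp [hbeq]),
        ih v (k + 1) (List.Nodup.of_cons hnd)
          (by rcases List.mem_cons.mp hm with h | h
              · exact absurd h.symm hv
              · exact h),
        List.idxOf_cons_ne _ hv]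
      have : k + 1 + List.idxOf v ys = k + (List.idxOf v ys).succ := by omega
      rw [this]

-- facts about pvYs / buckets -------------------------------------------------

theorem pv_map_ids {γ : Type} (tiles : List (List (String × Int))) (f : Int → γ) :
    (pvIds tiles).map f = (List.range tiles.length).map (fun i : Nat => f (i : Int)) := by
  unfold pvIds
  rw [List.map_map]
  rfl

theorem pv_yList_eq (tiles : List (List (String × Int))) :
    tiles.map (fun t => pvLook t "y") = (pvIds tiles).map (pvTileY tiles) := by
  rw [pv_map_ids tiles (pvTileY tiles),
    ← pv_map_getD_range (fun t => pvLook t "y") ([] : List (String × Int)) tiles]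
  apply List.map_congr_left
  intro i _
  rw [pv_tileY_nat]

theorem pv_ys_nodup (tiles : List (List (String × Int))) : (pvYs tiles).Nodup := by
  unfold pvYs
  exact (PySem.List.sorted_perm _ _ _).nodup_iff.mpr (PySem.Set.nodup_ofList _)

theorem pv_ys_pairwise (tiles : List (List (String × Int))) :
    (pvYs tiles).Pairwise (· < ·) := by
  unfold pvYs
  exact PySem.List.sorted_ofList_pairwise_lt _

theorem pv_mem_ys (tiles : List (List (String × Int))) (v : Int) :
    v ∈ pvYs tiles ↔ ∃ tid ∈ pvIds tiles, pvTileY tiles tid = v := by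
  unfold pvYs
  rw [PySem.List.mem_sorted, PySem.Set.mem_ofList, List.mem_map]

theorem pv_ids_nodup (tiles : List (List (String × Int))) : (pvIds tiles).Nodup := by
  unfold pvIds
  refine List.Nodup.map ?_ List.nodup_range
  intro a b h
  simpa using h

theorem pv_mem_bl (tiles : List (List (String × Int))) (v tid : Int) :
    tid ∈ pvBl tiles v ↔ tid ∈ pvIds tiles ∧ pvTileY tiles tid = v := by
  unfold pvBl pvBucket
  rw [PySem.List.mem_sorted, List.mem_filter]
  simp

theorem pv_bl_nodup (tiles : List (List (String × Int))) (v : Int) : (pvBl tiles v).Nodup := by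
  unfold pvBl
  exact (PySem.List.sorted_perm _ _ _).nodup_iff.mpr ((pv_ids_nodup tiles).filter _)

theorem pv_bl_ne_nil (tiles : List (List (String × Int))) (v : Int) (h : v ∈ pvYs tiles) :
    pvBl tiles v ≠ [] := by
  intro hnil
  unfold pvBl at hnil
  rw [PySem.List.sorted_eq_nil_iff] at hnil
  obtain ⟨tid, htid, hy⟩ := (pv_mem_ys tiles v).mp h
  have hmem : tid ∈ pvBucket tiles v := List.mem_filter.mpr ⟨htid, by simp [hy]⟩
  rw [hnil] at hmem
  cases hmem

theorem pv_mem_ids_nonneg (tiles : List (List (String × Int))) (tid : Int)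
    (h : tid ∈ pvIds tiles) : 0 ≤ tid := by
  unfold pvIds at h
  obtain ⟨i, -, rfl⟩ := List.mem_map.mp h
  exact Int.natCast_nonneg i

theorem pv_y_mem_ys (tiles : List (List (String × Int))) (i : Nat) (h : i < tiles.length) :
    pvTileY tiles (i : Int) ∈ pvYs tiles := by
  refine (pv_mem_ys tiles _).mpr ⟨(i : Int), ?_, rfl⟩
  unfold pvIds
  exact List.mem_map_of_mem (List.mem_range.mpr h)

theorem pv_y_to_row_get (tiles : List (List (String × Int))) (v : Int) (h : v ∈ pvYs tiles) :
    (((pvYs tiles).zipIdx.foldl (fun d p => d.insert p.1 (p.2 : Int))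
        (PySem.Dict.mk []))).get? v = some (pvRank tiles v) := by
  have hitems := pv_foldl_insert_items (fun p : Int × Nat => p.1) (fun p : Int × Nat => (p.2 : Int))
      ((pvYs tiles).zipIdx) (PySem.Dict.mk [])
      (by rw [pv_map_fst_zipIdx]; exact pv_ys_nodup tiles)
      (fun b _ => rfl)
  simp only [PySem.Dict.get?, hitems, List.nil_append]
  rw [pv_find_zipIdx (pvYs tiles) v 0 (pv_ys_nodup tiles) h]
  simp [pvRank]

-- A-side ---------------------------------------------------------------------

theorem pv_A_rows_loop (tiles : List (List (String × Int))) :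
    ∀ m, m ≤ tiles.length →
      (List.range m).foldl
        (fun rows i => rows.set ((pvYs tiles).idxOf (pvTileY tiles (i : Int)))
          ((rows.getD ((pvYs tiles).idxOf (pvTileY tiles (i : Int))) []) ++ [(i : Int)]))
        ((pvYs tiles).map (fun _ => ([] : List Int)))
      = (pvYs tiles).map
          (fun v => ((List.range m).map (fun i : Nat => (i : Int))).filter (fun tid => pvTileY tiles tid == v)) := by
  intro m
  induction m with
  | zero => simp
  | succ m ih =>
    intro hm
    have hml : m < tiles.length := by omega
    rw [List.range_succ, List.foldl_append, ih (by omega)]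
    simp only [List.foldl_cons, List.foldl_nil]
    have hmem : pvTileY tiles (m : Int) ∈ pvYs tiles := pv_y_mem_ys tiles m hml
    rw [pv_map_getD_idxOf _ _ _ _ hmem, pv_map_set_at _ _ _ _ (pv_ys_nodup tiles) hmem]
    apply List.map_congr_left
    intro v hv
    rw [List.map_append, List.filter_append]
    by_cases hvm : v = pvTileY tiles (m : Int)
    · subst hvm
      simp
    · have hb : (pvTileY tiles (m : Int) == v) = false :=
        beq_eq_false_iff_ne.mpr (fun h => hvm h.symm)
      simp [hvm, hb]

theorem pv_A_eq (tiles : List (List (String × Int))) :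
    build_row_ids_py tiles = (pvPairs tiles, pvRows tiles) := by
  simp only [build_row_ids_py]
  rw [pv_yList_eq]
  have hys : PySem.List.sorted (PySem.Set.ofList ((pvIds tiles).map (pvTileY tiles)))
      (fun y => y) false = pvYs tiles := rfl
  rw [hys]
  generalize hytr : ((pvYs tiles).zipIdx.foldl (fun d p => d.insert p.1 (p.2 : Int))
      (PySem.Dict.mk [])) = ytr
  have hget : ∀ v ∈ pvYs tiles, ytr.get? v = some (pvRank tiles v) := by
    intro v hv
    rw [← hytr]
    exact pv_y_to_row_get tiles v hv
  have hsplit := PySem.List.foldl_prod_mk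
      (fun (d : PySem.Dict Int Int) (p : List (String × Int) × Nat) =>
        d.insert (p.2 : Int) ((ytr.get? (pvLook p.1 "y")).getD 0))
      (fun (rows : List (List Int)) (p : List (String × Int) × Nat) =>
        rows.set ((ytr.get? (pvLook p.1 "y")).getD 0).toNat
          ((rows.getD ((ytr.get? (pvLook p.1 "y")).getD 0).toNat []) ++ [(p.2 : Int)]))
      tiles.zipIdx (PySem.Dict.mk []) (List.replicate (pvYs tiles).length ([] : List Int))
  rw [hsplit, pv_zipIdx_eq_map ([] : List (String × Int)) tiles 0, List.foldl_map,
    List.foldl_map]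
  simp only [Nat.zero_add]
  rw [Prod.mk.injEq]
  constructor
  · rw [pv_foldl_insert_items (fun i : Nat => (i : Int))
        (fun i : Nat => ((ytr.get? (pvLook (tiles.getD i []) "y")).getD 0))
        (List.range tiles.length) (PySem.Dict.mk [])
        (pv_ids_nodup tiles) (fun b _ => rfl)]
    have h0 : (PySem.Dict.mk ([] : List (Int × Int))).items = [] := rfl
    rw [h0, List.nil_append]
    have hP : pvPairs tiles = (List.range tiles.length).map
        (fun i : Nat => ((i : Int), pvRank tiles (pvTileY tiles (i : Int)))) := by
      unfold pvPairs
      rw [pv_map_ids]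
    rw [hP]
    apply List.map_congr_left
    intro i hi
    have hi' : i < tiles.length := List.mem_range.mp hi
    rw [← pv_tileY_nat, hget _ (pv_y_mem_ys tiles i hi')]
    rfl
  · rw [PySem.List.foldl_congr_mem (List.range tiles.length) _
        (fun (rows : List (List Int)) (i : Nat) =>
          rows.set ((pvYs tiles).idxOf (pvTileY tiles (i : Int)))
            ((rows.getD ((pvYs tiles).idxOf (pvTileY tiles (i : Int))) []) ++ [(i : Int)]))
        (List.replicate (pvYs tiles).length ([] : List Int))
        (by
          intro acc i hi
          have hi' : i < tiles.length := List.mem_range.mp hi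
          rw [← pv_tileY_nat, hget _ (pv_y_mem_ys tiles i hi')]
          simp [pvRank])]
    have hrep : List.replicate (pvYs tiles).length ([] : List Int)
        = (pvYs tiles).map (fun _ => ([] : List Int)) := by
      rw [← List.map_const]
      rfl
    rw [hrep, pv_A_rows_loop tiles tiles.length (le_refl _),
      pv_foldl_set_map (fun row => PySem.List.sorted row
        (fun tid => pvLook (PySem.List.pyGetD tiles tid []) "x") false) ([] : List Int),
      List.map_map]
    rfl

-- B-side ---------------------------------------------------------------------

def pvRoApply (Bl : Int → List Int) : Nat → List Int → List Int → List Int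
  | _, [], ro => ro
  | base, v :: vs, ro =>
      pvRoApply Bl (base + 1) vs ((Bl v).foldl (fun ro t => ro.set t.toNat (base : Int)) ro)

theorem pv_bstep_eval (tiles : List (List (String × Int))) (t : Int)
    (rows0 : List (List Int)) (cur : List Int) (ro0 : List Int) (prev : Int)
    (h : pvTileY tiles t = prev) :
    pvBStep tiles (rows0 ++ [cur], ro0, prev) t
      = (rows0 ++ [cur ++ [t]], ro0.set t.toNat ((rows0.length : Int)), prev) := by
  simp only [pvBStep, h]
  rw [if_neg (by simp)]
  have h1 : (rows0 ++ [cur]).length - 1 = rows0.length := by simp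
  rw [h1, List.getD_append_right _ _ _ _ (le_refl _), Nat.sub_self, List.getD_cons_zero,
    List.set_append_right _ _ (le_refl _), Nat.sub_self, List.set_cons_zero]
  have h2 : (((rows0 ++ [cur ++ [t]]).length : Nat) : Int) - 1 = (rows0.length : Int) := by
    simp only [List.length_append, List.length_cons, List.length_nil]
    omega
  rw [h2]

theorem pv_bstep_block (tiles : List (List (String × Int))) (v : Int) :
    ∀ (ws : List Int), (∀ t ∈ ws, pvTileY tiles t = v) →
      ∀ (rows0 : List (List Int)) (cur : List Int) (ro0 : List Int),
        List.foldl (pvBStep tiles) (rows0 ++ [cur], ro0, v) ws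
          = (rows0 ++ [cur ++ ws],
             ws.foldl (fun ro t => ro.set t.toNat (rows0.length : Int)) ro0, v) := by
  intro ws
  induction ws with
  | nil => intro _ rows0 cur ro0; simp
  | cons t ws ih =>
    intro hY rows0 cur ro0
    simp only [List.foldl_cons]
    rw [pv_bstep_eval tiles t rows0 cur ro0 v (hY t (List.mem_cons_self ..)),
      ih (fun t' ht' => hY t' (List.mem_cons_of_mem _ ht')) rows0 (cur ++ [t]) _]
    simp [List.append_assoc]

theorem pv_bstep_block_start (tiles : List (List (String × Int))) (v : Int)
    (ws : List Int) (hne : ws ≠ []) (hy : ∀ t ∈ ws, pvTileY tiles t = v)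
    (rows0 : List (List Int)) (ro0 : List Int) (prev : Int)
    (hc : (rows0.isEmpty || !(v == prev)) = true) :
    List.foldl (pvBStep tiles) (rows0, ro0, prev) ws
      = (rows0 ++ [ws],
         ws.foldl (fun ro t => ro.set t.toNat (rows0.length : Int)) ro0, v) := by
  cases ws with
  | nil => exact absurd rfl hne
  | cons t ws =>
    have hyt : pvTileY tiles t = v := hy t (List.mem_cons_self ..)
    simp only [List.foldl_cons]
    have hstep : pvBStep tiles (rows0, ro0, prev) t
        = (rows0 ++ [[t]], ro0.set t.toNat ((rows0.length : Int)), v) := by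
      simp only [pvBStep, hyt]
      rw [if_pos hc]
      have h1 : (rows0 ++ [[]]).length - 1 = rows0.length := by simp
      rw [h1, List.getD_append_right _ _ _ _ (le_refl _), Nat.sub_self, List.getD_cons_zero,
        List.set_append_right _ _ (le_refl _), Nat.sub_self, List.set_cons_zero,
        List.nil_append]
      have h2 : (((rows0 ++ [[t]]).length : Nat) : Int) - 1 = (rows0.length : Int) := by
        simp only [List.length_append, List.length_cons, List.length_nil]
        omega
      rw [h2]
    rw [hstep, pv_bstep_block tiles v ws (fun t' ht' => hy t' (List.mem_cons_of_mem _ ht'))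
      rows0 [t] _]
    simp only [List.singleton_append]

theorem pv_bstep_groups (tiles : List (List (String × Int))) (Bl : Int → List Int) :
    ∀ (vs : List Int) (rows0 : List (List Int)) (ro0 : List Int) (prev : Int),
      vs.Pairwise (· < ·) → (∀ v ∈ vs, Bl v ≠ []) →
      (∀ v ∈ vs, ∀ t ∈ Bl v, pvTileY tiles t = v) →
      (rows0 = [] ∨ ∀ v ∈ vs, ¬ v = prev) →
      List.foldl (pvBStep tiles) (rows0, ro0, prev) (vs.flatMap Bl)
        = (rows0 ++ vs.map Bl, pvRoApply Bl rows0.length vs ro0, vs.getLastD prev) := by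
  intro vs
  induction vs with
  | nil =>
    intro rows0 ro0 prev _ _ _ _
    simp [pvRoApply]
  | cons v vs ih =>
    intro rows0 ro0 prev hpw hne hY hd
    have hcond : (rows0.isEmpty || !(v == prev)) = true := by
      rcases hd with h | h
      · subst h; simp
      · have hvp := h v (List.mem_cons_self ..)
        simp [beq_eq_false_iff_ne.mpr hvp]
    rw [List.flatMap_cons, List.foldl_append,
      pv_bstep_block_start tiles v (Bl v) (hne v (List.mem_cons_self ..))
        (hY v (List.mem_cons_self ..)) rows0 ro0 prev hcond,
      ih (rows0 ++ [Bl v]) _ v ((List.pairwise_cons.mp hpw).2)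
        (fun w hw => hne w (List.mem_cons_of_mem _ hw))
        (fun w hw => hY w (List.mem_cons_of_mem _ hw))
        (Or.inr (fun w hw hwv => by
          have := (List.pairwise_cons.mp hpw).1 w hw
          omega))]
    rw [Prod.mk.injEq, Prod.mk.injEq]
    refine ⟨by simp, ?_, by rw [List.getLastD_cons]⟩
    simp only [pvRoApply, List.length_append, List.length_cons, List.length_nil,
      Nat.zero_add]

theorem pv_foldl_set_length (ws : List Int) (val : Int) :
    ∀ ro : List Int, (ws.foldl (fun ro t => ro.set t.toNat val) ro).length = ro.length := by
  induction ws with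
  | nil => intro ro; rfl
  | cons t ws ih =>
    intro ro
    simp only [List.foldl_cons]
    rw [ih]
    simp

theorem pv_foldl_set_miss (val : Int) (p : Nat) (d : Int) :
    ∀ (ws : List Int) (ro : List Int), (∀ t ∈ ws, t.toNat ≠ p) →
      (ws.foldl (fun ro t => ro.set t.toNat val) ro).getD p d = ro.getD p d := by
  intro ws
  induction ws with
  | nil => intro ro _; rfl
  | cons t ws ih =>
    intro ro h
    simp only [List.foldl_cons]
    rw [ih _ (fun t' ht' => h t' (List.mem_cons_of_mem _ ht')),
      pv_getD_set_ne _ _ _ _ _ (h t (List.mem_cons_self ..))]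

theorem pv_foldl_set_hit (val : Int) (tid : Int) :
    ∀ (ws : List Int) (ro : List Int), tid ∈ ws → ws.Nodup → (∀ t ∈ ws, 0 ≤ t) → 0 ≤ tid →
      tid.toNat < ro.length →
      (ws.foldl (fun ro t => ro.set t.toNat val) ro).getD tid.toNat 0 = val := by
  intro ws
  induction ws with
  | nil => intro ro hm; cases hm
  | cons t ws ih =>
    intro ro hm hnd h0 htid hlt
    simp only [List.foldl_cons]
    by_cases he : t = tid
    · subst he
      have hnin : t ∉ ws := (List.nodup_cons.mp hnd).1
      rw [pv_foldl_set_miss _ _ _ ws _ (fun t' ht' => ?_),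
        pv_getD_set_self _ _ _ _ hlt]
      have h0' := h0 t' (List.mem_cons_of_mem _ ht')
      have hne : t' ≠ t := fun hh => hnin (hh ▸ ht')
      have h0t := h0 t (List.mem_cons_self ..)
      omega
    · have hm' : tid ∈ ws := by
        rcases List.mem_cons.mp hm with h | h
        · exact absurd h.symm he
        · exact h
      exact ih _ hm' (List.Nodup.of_cons hnd)
        (fun t' ht' => h0 t' (List.mem_cons_of_mem _ ht')) htid
        (by rw [List.length_set]; exact hlt)

theorem pv_roApply_miss (tiles : List (List (String × Int))) (Bl : Int → List Int)
    (tid : Int) (d : Int) (h0 : 0 ≤ tid) :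
    ∀ (vs : List Int) (base : Nat) (ro : List Int),
      (∀ v ∈ vs, ∀ t ∈ Bl v, pvTileY tiles t = v) →
      (∀ v ∈ vs, ∀ t ∈ Bl v, 0 ≤ t) →
      pvTileY tiles tid ∉ vs →
      (pvRoApply Bl base vs ro).getD tid.toNat d = ro.getD tid.toNat d := by
  intro vs
  induction vs with
  | nil => intro base ro _ _ _; rfl
  | cons v vs ih =>
    intro base ro hY hpos hnm
    simp only [pvRoApply]
    rw [ih (base + 1) _ (fun w hw => hY w (List.mem_cons_of_mem _ hw))
      (fun w hw => hpos w (List.mem_cons_of_mem _ hw))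
      (fun h => hnm (List.mem_cons_of_mem _ h))]
    refine pv_foldl_set_miss _ _ _ (Bl v) ro (fun t ht => ?_)
    have h1 : pvTileY tiles t = v := hY v (List.mem_cons_self ..) t ht
    have h2 : 0 ≤ t := hpos v (List.mem_cons_self ..) t ht
    have h3 : ¬ pvTileY tiles tid = v := fun hh => hnm (hh ▸ List.mem_cons_self ..)
    have h4 : t ≠ tid := fun hh => h3 (hh ▸ h1)
    omega

theorem pv_roApply_hit (tiles : List (List (String × Int))) (Bl : Int → List Int) (tid : Int) :
    ∀ (vs : List Int) (base : Nat) (ro : List Int),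
      (∀ v ∈ vs, ∀ t ∈ Bl v, pvTileY tiles t = v) → (∀ v ∈ vs, ∀ t ∈ Bl v, 0 ≤ t) →
      vs.Nodup → (∀ v ∈ vs, (Bl v).Nodup) → 0 ≤ tid → tid.toNat < ro.length →
      pvTileY tiles tid ∈ vs → tid ∈ Bl (pvTileY tiles tid) →
      (pvRoApply Bl base vs ro).getD tid.toNat 0
        = ((base + vs.idxOf (pvTileY tiles tid) : Nat) : Int) := by
  intro vs
  induction vs with
  | nil => intro base ro _ _ _ _ _ _ hmem _; cases hmem
  | cons v vs ih =>
    intro base ro hY hpos hnd hbnd h0 hlt hmem hbl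
    simp only [pvRoApply]
    by_cases hv : pvTileY tiles tid = v
    · have hnm : pvTileY tiles tid ∉ vs := by
        rw [hv]; exact (List.nodup_cons.mp hnd).1
      rw [pv_roApply_miss tiles Bl tid _ h0 vs (base + 1) _
        (fun w hw => hY w (List.mem_cons_of_mem _ hw))
        (fun w hw => hpos w (List.mem_cons_of_mem _ hw)) hnm]
      have hblv : tid ∈ Bl v := hv ▸ hbl
      rw [pv_foldl_set_hit _ tid (Bl v) ro hblv (hbnd v (List.mem_cons_self ..))
        (hpos v (List.mem_cons_self ..)) h0 hlt, hv, List.idxOf_cons_self]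
      simp
    · have hmem' : pvTileY tiles tid ∈ vs := by
        rcases List.mem_cons.mp hmem with h | h
        · exact absurd h hv
        · exact h
      rw [ih (base + 1) _ (fun w hw => hY w (List.mem_cons_of_mem _ hw))
        (fun w hw => hpos w (List.mem_cons_of_mem _ hw))
        (List.Nodup.of_cons hnd) (fun w hw => hbnd w (List.mem_cons_of_mem _ hw))
        h0 (by rw [pv_foldl_set_length]; exact hlt) hmem' hbl,
        List.idxOf_cons_ne _ (fun h => hv h.symm)]
      have : base + 1 + vs.idxOf (pvTileY tiles tid)
          = base + (vs.idxOf (pvTileY tiles tid)).succ := by omega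
      rw [this]

theorem pv_B_eq (tiles : List (List (String × Int))) :
    build_row_ids_py_alt tiles = (pvPairs tiles, pvRows tiles) := by
  simp only [build_row_ids_py_alt]
  rw [PySem.List.pyRange_zero_natCast, pv_sorted2_flatten (pvTileY tiles) (pvTileX tiles)]
  have hgroups := pv_bstep_groups tiles (pvBl tiles) (pvYs tiles) []
      (List.replicate tiles.length (0 : Int)) 0 (pv_ys_pairwise tiles)
      (fun v hv => pv_bl_ne_nil tiles v hv)
      (fun v hv t ht => ((pv_mem_bl tiles v t).mp ht).2)
      (Or.inl rfl)
  have hblf : (fun v => PySem.List.sorted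
      (List.filter (fun x => pvTileY tiles x == v)
        (List.map (fun k : Nat => (k : Int)) (List.range tiles.length)))
      (pvTileX tiles) false) = pvBl tiles := rfl
  have hysf : PySem.List.sorted (PySem.Set.ofList
      (List.map (pvTileY tiles) (List.map (fun k : Nat => (k : Int)) (List.range tiles.length))))
      (fun y => y) false = pvYs tiles := rfl
  rw [hblf, hysf, hgroups]
  simp only [List.nil_append, List.length_nil]
  rw [Prod.mk.injEq]
  constructor
  · rw [List.foldl_map,
      pv_foldl_insert_items (fun i : Nat => (i : Int))
        (fun i : Nat => PySem.List.pyGetD (pvRoApply (pvBl tiles) 0 (pvYs tiles)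
          (List.replicate tiles.length (0 : Int))) (i : Int) 0)
        (List.range tiles.length) (PySem.Dict.mk [])
        (pv_ids_nodup tiles) (fun b _ => rfl)]
    have h0 : (PySem.Dict.mk ([] : List (Int × Int))).items = [] := rfl
    rw [h0, List.nil_append]
    have hP : pvPairs tiles = (List.range tiles.length).map
        (fun i : Nat => ((i : Int), pvRank tiles (pvTileY tiles (i : Int)))) := by
      unfold pvPairs
      rw [pv_map_ids]
    rw [hP]
    apply List.map_congr_left
    intro i hi
    have hi' : i < tiles.length := List.mem_range.mp hi
    have hYm : pvTileY tiles (i : Int) ∈ pvYs tiles := pv_y_mem_ys tiles i hi'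
    have hbl : ((i : Nat) : Int) ∈ pvBl tiles (pvTileY tiles (i : Int)) := by
      refine (pv_mem_bl tiles _ _).mpr ⟨?_, rfl⟩
      unfold pvIds
      exact List.mem_map_of_mem (List.mem_range.mpr hi')
    have hval : PySem.List.pyGetD (pvRoApply (pvBl tiles) 0 (pvYs tiles)
        (List.replicate tiles.length (0 : Int))) (i : Int) 0
        = pvRank tiles (pvTileY tiles (i : Int)) := by
      rw [PySem.List.pyGetD_natCast]
      have hhit := pv_roApply_hit tiles (pvBl tiles) ((i : Nat) : Int) (pvYs tiles) 0
          (List.replicate tiles.length (0 : Int))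
          (fun v hv t ht => ((pv_mem_bl tiles v t).mp ht).2)
          (fun v hv t ht => pv_mem_ids_nonneg tiles t ((pv_mem_bl tiles v t).mp ht).1)
          (pv_ys_nodup tiles) (fun v _ => pv_bl_nodup tiles v)
          (Int.natCast_nonneg i) (by simp [hi']) hYm hbl
      simp only [Int.toNat_natCast] at hhit
      rw [hhit]
      simp [pvRank]
    rw [hval]
  · rfl

-- ===== VERDICT (by name: the statement is the Claim_ definition above) =====
theorem build_row_ids_py_spec : Claim_equal_build_row_ids_py := by
  intro tiles _ _
  unfold Spec_build_row_ids_py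
  rw [pv_A_eq, pv_B_eq]
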